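-- pv_equiv track=rewrite | github.com/BradMcDanel/term-quantization | booth.py | radix_2
-- ===== SOURCE A (Python) =====
-- def radix_2(number):
--     char_number = bin(number).split('b')[1]
--     if bin(number)[0] == '-':
--         sign = -1
--     else:
--         sign = 1
--     char_number = '0' + char_number + '0'
--     char_number = char_number[::-1]
--     exponents = []
--     for i in range(len(char_number) - 1):
--         b1 = char_number[i]
--         b2 = char_number[i+1]
--         if b1 == b2:
--             continue
--         if b1 == '0':
--             exponents.append(-sign*2**i)
--         else:
--             exponents.append(sign*2**i)
--
--     return exponents
-- ===== SOURCE B (Python) =====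
-- def radix_2(number):
--     sign = -1 if number < 0 else 1
--     p = 2 * abs(number)
--     q = p ^ (p >> 1)
--
--     def go(p, q, i):
--         if q == 0:
--             return []
--         d = sign * (1 << i) if p & 1 else -sign * (1 << i)
--         rest = go(p >> 1, q >> 1, i + 1)
--         return ([d] + rest) if (q & 1) else rest
--
--     return go(p, q, 0)
-- ===== Notes on version B (the rewrite author's own statement) =====
-- stated objective: alternative
-- what changed: Replaces A's bin()-string construction, padding, reversal and adjacent-character comparison loop by pure bit arithmetic: B walks the xor transition mask of twice the magnitude LSB-first and emits a signed power of two at each set bit.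
import Mathlib
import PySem

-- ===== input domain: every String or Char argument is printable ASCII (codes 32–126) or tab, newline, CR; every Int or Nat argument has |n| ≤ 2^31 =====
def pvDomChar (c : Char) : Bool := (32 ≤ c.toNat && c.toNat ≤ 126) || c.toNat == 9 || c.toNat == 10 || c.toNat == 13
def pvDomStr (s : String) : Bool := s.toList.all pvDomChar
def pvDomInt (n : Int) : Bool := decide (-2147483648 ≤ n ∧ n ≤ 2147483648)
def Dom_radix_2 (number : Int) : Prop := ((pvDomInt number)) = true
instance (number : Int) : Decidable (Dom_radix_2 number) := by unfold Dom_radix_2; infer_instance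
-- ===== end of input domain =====

-- B replaces A's string-of-bits adjacent-character scan by the XOR transition mask
-- q = p ^ (p >> 1) of p = 2*|n|, walking the bits numerically (objective: alternative).

-- ===== PORT A =====

-- Python's bin(): digits of |n| MSB-first (bin(0) = "0"), preceded by "-" for n < 0 and "0b".
def pvBinAux : Nat → List Char
  | 0 => []
  | (n+1) => pvBinAux ((n+1) / 2) ++ [if (n+1) % 2 = 1 then '1' else '0']
decreasing_by exact Nat.div_lt_self (Nat.succ_pos n) (by norm_num)

def pvBinDigits (m : Nat) : List Char := if m = 0 then ['0'] else pvBinAux m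

def pvBin (n : Int) : List Char :=
  (if n < 0 then ['-'] else []) ++ ['0', 'b'] ++ pvBinDigits n.natAbs

-- Python str.split(sep) for a single-character separator, on the char list.
def pvSplitChar (sep : Char) : List Char → List (List Char)
  | [] => [[]]
  | c :: rest =>
    match pvSplitChar sep rest with
    | [] => [[]]  -- unreachable: pvSplitChar never returns []
    | g :: gs => if c = sep then [] :: g :: gs else (c :: g) :: gs

def radix_2 (number : Int) : List Int :=
  -- char_number = bin(number).split('b')[1]  (index 1 always exists: bin contains 'b')
  let char_number0 := (pvSplitChar 'b' (pvBin number)).getD 1 []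
  -- sign from bin(number)[0] == '-'  (bin is never empty)
  let sign : Int := if (pvBin number).headD ' ' = '-' then -1 else 1
  -- char_number = ('0' + char_number + '0')[::-1]
  let char_number := ('0' :: char_number0 ++ ['0']).reverse
  -- for i in range(len(char_number) - 1): compare char_number[i], char_number[i+1]
  (List.range (char_number.length - 1)).foldl
    (fun exponents i =>
      let b1 := char_number.getD i ' '
      let b2 := char_number.getD (i+1) ' '
      if b1 = b2 then exponents
      else if b1 = '0' then exponents ++ [-sign * 2 ^ i]
      else exponents ++ [sign * 2 ^ i])
    []

-- ===== PORT B =====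

def pvGoB (sign : Int) (p q i : Nat) : List Int :=
  if q = 0 then []
  else
    let d : Int := if p % 2 = 1 then sign * ((1 <<< i : Nat) : Int) else -sign * ((1 <<< i : Nat) : Int)
    let rest := pvGoB sign (p >>> 1) (q >>> 1) (i + 1)
    if q % 2 = 1 then d :: rest else rest
termination_by q
decreasing_by simpa [Nat.shiftRight_succ] using Nat.div_lt_self (Nat.pos_of_ne_zero (by assumption)) (by norm_num)

def radix_2_alt (number : Int) : List Int :=
  let sign : Int := if number < 0 then -1 else 1
  let p : Nat := 2 * number.natAbs
  let q : Nat := p ^^^ (p >>> 1)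
  pvGoB sign p q 0

-- ===== PRECONDITION & SPEC =====
def Spec_radix_2 (number : Int) (out : List Int) : Prop := out = radix_2_alt number
instance (number : Int) (out : List Int) : Decidable (Spec_radix_2 number out) := by unfold Spec_radix_2; infer_instance

-- ===== CLAIM (what is proved, stated in full; the proofs are below) =====
def Claim_equal_radix_2 : Prop := ∀ (number : Int), Dom_radix_2 number → Spec_radix_2 number (radix_2 number)

-- ===== LEMMAS AND PROOFS =====

-- LSB-first bit characters of a natural number (empty for 0).
def lsbChars : Nat → List Char
  | 0 => []
  | (n+1) => (if (n+1) % 2 = 1 then '1' else '0') :: lsbChars ((n+1) / 2)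
decreasing_by exact Nat.div_lt_self (Nat.succ_pos n) (by norm_num)

-- adjacent-pair walk, the common shape of both loops
def walk (sign : Int) : List Char → Nat → List Int
  | c1 :: c2 :: rest, i =>
      (if c1 = c2 then [] else [if c1 = '0' then -sign * 2 ^ i else sign * 2 ^ i])
        ++ walk sign (c2 :: rest) (i + 1)
  | _, _ => []

theorem pvBinAux_reverse (p : Nat) : (pvBinAux p).reverse = lsbChars p := by
  induction p using Nat.strong_induction_on with
  | _ p ih =>
    match p with
    | 0 => simp [pvBinAux, lsbChars]
    | (n+1) =>
      rw [pvBinAux, lsbChars, List.reverse_append]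
      simp [ih ((n+1)/2) (Nat.div_lt_self (Nat.succ_pos n) (by norm_num))]

theorem pvSplitChar_no_sep (sep : Char) (l : List Char) (h : sep ∉ l) :
    pvSplitChar sep l = [l] := by
  induction l with
  | nil => rfl
  | cons c rest ih =>
    simp only [List.mem_cons, not_or] at h
    rw [pvSplitChar, ih h.2]
    simp [Ne.symm h.1]

theorem pvSplitChar_mid (sep : Char) (xs ds : List Char) (hx : sep ∉ xs) (hd : sep ∉ ds) :
    pvSplitChar sep (xs ++ sep :: ds) = [xs, ds] := by
  induction xs with
  | nil => simp [pvSplitChar, pvSplitChar_no_sep sep ds hd]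
  | cons c rest ih =>
    simp only [List.mem_cons, not_or] at hx
    rw [List.cons_append, pvSplitChar, ih hx.2]
    simp [Ne.symm hx.1]

theorem pvBinAux_no_b (p : Nat) : 'b' ∉ pvBinAux p := by
  induction p using Nat.strong_induction_on with
  | _ p ih =>
    match p with
    | 0 => simp [pvBinAux]
    | (n+1) =>
      rw [pvBinAux]
      simp only [List.mem_append, List.mem_singleton, not_or]
      refine ⟨ih ((n+1)/2) (Nat.div_lt_self (Nat.succ_pos n) (by norm_num)), ?_⟩
      split <;> decide

theorem pvBinDigits_no_b (m : Nat) : 'b' ∉ pvBinDigits m := by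
  unfold pvBinDigits
  split
  · decide
  · exact pvBinAux_no_b m

-- the split really extracts the digit string
theorem split_pvBin (n : Int) :
    (pvSplitChar 'b' (pvBin n)).getD 1 [] = pvBinDigits n.natAbs := by
  unfold pvBin
  rcases lt_or_ge n 0 with h | h
  · rw [if_pos h,
      show ((['-'] ++ ['0', 'b'] ++ pvBinDigits n.natAbs : List Char))
        = ['-', '0'] ++ 'b' :: pvBinDigits n.natAbs from rfl,
      pvSplitChar_mid 'b' _ _ (by decide) (pvBinDigits_no_b _)]
    rfl
  · rw [if_neg (not_lt.mpr h),
      show (([] ++ ['0', 'b'] ++ pvBinDigits n.natAbs : List Char))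
        = ['0'] ++ 'b' :: pvBinDigits n.natAbs from rfl,
      pvSplitChar_mid 'b' _ _ (by decide) (pvBinDigits_no_b _)]
    rfl

-- the indexed foldl over range is the adjacent-pair walk
theorem fold_walk (sign : Int) (L : List Char) :
    ∀ (n j : Nat) (acc : List Int), j + n + 1 = L.length →
    (List.range' j n).foldl
      (fun exponents i =>
        let b1 := L.getD i ' '
        let b2 := L.getD (i+1) ' '
        if b1 = b2 then exponents
        else if b1 = '0' then exponents ++ [-sign * 2 ^ i]
        else exponents ++ [sign * 2 ^ i]) acc
      = acc ++ walk sign (L.drop j) j := by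
  intro n
  induction n with
  | zero =>
    intro j acc h
    have hd : (L.drop j).length = 1 := by simp; omega
    cases hl : L.drop j with
    | nil => rw [hl] at hd; simp at hd
    | cons c t =>
      rw [hl] at hd
      cases t with
      | nil => simp [walk]
      | cons d t' => simp at hd
  | succ n ih =>
    intro j acc h
    have hj1 : j + 1 < L.length := by omega
    have hj : j < L.length := by omega
    have hdrop : L.drop j = L[j] :: L[j+1] :: L.drop (j+2) := by
      rw [List.drop_eq_getElem_cons hj, List.drop_eq_getElem_cons hj1]
    have hdrop1 : L.drop (j+1) = L[j+1] :: L.drop (j+2) := by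
      rw [List.drop_eq_getElem_cons hj1]
    have hg1 : L.getD j ' ' = L[j] := by simp [List.getD, List.getElem?_eq_getElem hj]
    have hg2 : L.getD (j+1) ' ' = L[j+1] := by simp [List.getD, List.getElem?_eq_getElem hj1]
    rw [List.range'_succ, List.foldl_cons, ih (j+1) _ (by omega), hdrop, walk, ← hdrop1]
    simp only [hg1, hg2]
    split_ifs <;> simp

-- the B loop with the xor mask is the adjacent-pair walk over LSB bits (with the MSB guard zero)
theorem goB_walk (sign : Int) (p : Nat) :
    ∀ i, pvGoB sign p (p ^^^ (p >>> 1)) i = walk sign (lsbChars p ++ ['0']) i := by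
  induction p using Nat.strong_induction_on with
  | _ p ih =>
    intro i
    match p with
    | 0 => rw [pvGoB]; simp [lsbChars, walk]
    | (n+1) =>
      have hp2 : (n+1) / 2 < n + 1 := Nat.div_lt_self (Nat.succ_pos n) (by norm_num)
      have hq : (n+1) ^^^ ((n+1) >>> 1) ≠ 0 := by
        simp only [Nat.shiftRight_one]
        intro h
        have := Nat.xor_eq_zero_iff.mp h
        omega
      rw [pvGoB, if_neg hq]
      have hshift : ((n+1) ^^^ ((n+1) >>> 1)) >>> 1 = ((n+1) >>> 1) ^^^ (((n+1) >>> 1) >>> 1) := by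
        apply Nat.eq_of_testBit_eq
        intro k
        simp [Nat.testBit_shiftRight, Nat.testBit_xor]
      have hmod : ((n+1) ^^^ ((n+1) >>> 1)) % 2 = 1 ↔ (n+1) % 2 ≠ ((n+1)/2) % 2 := by
        have h0 := Nat.testBit_xor (n+1) ((n+1) >>> 1) 0
        simp only [Nat.testBit_zero, Nat.shiftRight_one] at h0 ⊢
        rcases Nat.mod_two_eq_zero_or_one (n+1) with h1 | h1 <;>
          rcases Nat.mod_two_eq_zero_or_one ((n+1)/2) with h2 | h2 <;>
          rcases Nat.mod_two_eq_zero_or_one ((n+1) ^^^ (n+1)/2) with h3 | h3 <;>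
          simp_all
      have hrec := ih ((n+1)/2) hp2 (i+1)
      -- the second character of the pair is the low bit of (n+1)/2, even when (n+1)/2 = 0
      have hhead : ∃ rest, lsbChars ((n+1)/2) ++ ['0']
          = (if ((n+1)/2) % 2 = 1 then '1' else '0') :: rest
          ∧ (if ((n+1)/2) % 2 = 1 then '1' else '0') :: rest = lsbChars ((n+1)/2) ++ ['0'] := by
        match hm : (n+1)/2 with
        | 0 => exact ⟨[], by simp [lsbChars], by simp [lsbChars]⟩
        | (m+1) => exact ⟨lsbChars ((m+1)/2) ++ ['0'], by rw [lsbChars]; simp, by rw [lsbChars]; simp⟩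
      obtain ⟨rest, hr1, hr2⟩ := hhead
      rw [show lsbChars (n+1) = (if (n+1) % 2 = 1 then '1' else '0') :: lsbChars ((n+1)/2) from by rw [lsbChars]]
      rw [List.cons_append, hr1, walk, hr2]
      simp only [Nat.shiftRight_one] at hshift hrec hmod ⊢
      rw [hshift, ← hrec]
      have hpow : ((1 <<< i : Nat) : Int) = 2 ^ i := by
        simp [Nat.shiftLeft_eq]
      rcases Nat.mod_two_eq_zero_or_one (n+1) with h1 | h1 <;>
        rcases Nat.mod_two_eq_zero_or_one ((n+1)/2) with h2 | h2 <;>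
        simp [h1, h2, hpow] <;> omega

theorem lsbChars_double (m : Nat) (hm : m ≠ 0) : lsbChars (2 * m) = '0' :: lsbChars m := by
  match h : 2 * m with
  | 0 => omega
  | (k+1) =>
    rw [lsbChars]
    have h1 : (k+1) % 2 = 0 := by omega
    have h2 : (k+1) / 2 = m := by omega
    simp [h1, h2]

-- ===== VERDICT (by name: the statement is the Claim_ definition above) =====
theorem radix_2_spec : Claim_equal_radix_2 := by
  intro number _
  unfold Spec_radix_2
  by_cases h0 : number = 0
  · subst h0
    have hA : radix_2 0 = [] := by decide
    have hB : radix_2_alt 0 = [] := by simp [radix_2_alt, pvGoB]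
    rw [hA, hB]
  · unfold radix_2 radix_2_alt
    have hm : number.natAbs ≠ 0 := Int.natAbs_ne_zero.mpr h0
    simp only [split_pvBin]
    have hsign : ((pvBin number).headD ' ' = '-') = (number < 0) := by
      unfold pvBin
      rcases lt_or_ge number 0 with h | h
      · simp [h]
      · simp [not_lt.mpr h]
    simp only [hsign]
    have hdig : pvBinDigits number.natAbs = pvBinAux number.natAbs := by
      unfold pvBinDigits; rw [if_neg hm]
    rw [hdig]
    have hrev : ('0' :: pvBinAux number.natAbs ++ ['0']).reverse
        = lsbChars (2 * number.natAbs) ++ ['0'] := by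
      rw [lsbChars_double _ hm, ← pvBinAux_reverse]
      simp
    rw [hrev]
    set sign : Int := if number < 0 then -1 else 1 with hs
    rw [List.range_eq_range',
      fold_walk sign _ ((lsbChars (2 * number.natAbs) ++ ['0']).length - 1) 0 [] (by simp),
      goB_walk]
    simp
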